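/- GENERATED by farm/mkstatement.py from design/units.tsv (unit `two_to`) and the Specs of Vorbis/Spec/*.lean — do not edit.
   THE STATEMENT of the proof unit `two_to`: the function `two_to` (4 instructions) satisfies its contract,
   given the contracts of its callees. What the names mean: Vorbis/Spec/Basic.lean. The theorem to prove:
   `theorem two_to_ok : Vorbis.Spec.two_to.Statement`. -/
import Vorbis.Spec.Libm
namespace Vorbis.Spec.two_to
open X86 X86.User Asan

/-- The statement of unit `two_to`. -/
def Statement : Prop :=
  ∀ (Lay : Layout) (_hLay : Lay.hi = 0x1000000) (μ : Microarch) (_hμ : UserX.MicroOK μ) (u₀ : State)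
    (_hcode : HasCodeNat Lay u₀ Vorbis.L.two_to.entry Vorbis.Code.code_two_to.nat Vorbis.L.two_to.size),
    ∀ (others : List Obj) (frames : List (Nat × FrameLayout)), Calls Lay μ Vorbis.WayInv (Vorbis.conv u₀) Vorbis.L.two_to.entry (Vorbis.Spec.two_to.spec others frames)

end Vorbis.Spec.two_to
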